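-- pv_equiv track=rewrite | github.com/wiltonvgc/projeto1 | cgi-bin/webserver.py | criaPacote
-- ===== SOURCE A (Python) =====
-- def crc16(data):
-- 	num_bits_data = len(data)
-- 	poli_crc16 = int('11000000000000101',2) #x16 + x15 + x2 + 1
-- 	atual_data = data #atual_data guarda dados apos processamento de crc
--
-- 	#executa algoritmo enquanto o numero de bits for diferente de 16
-- 	while(len(atual_data)!=16):
-- 		#se bit mais a esquerda e 1 faz xor com 17 mais significativos de data com polinomio e descarta bit mais significativo
-- 		if(atual_data[0]=='1'):
-- 			data_17 = int(atual_data[0:17],2)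
-- 			data_xor = data_17 ^ poli_crc16
-- 			atual_data = "{:017b}".format(data_xor) + atual_data[17:]
-- 			atual_data = atual_data[1:]
-- 		else:
-- 			#se bit mais a esquerda e 0, apenas descarta bit mais a esquerda
-- 			atual_data = atual_data[1:]
--
-- 	return atual_data
--
-- def criaPacote(version, ihl, type_of_service, total_length, identification, flags, fragment_offset, time_to_live, protocol, header_checksum, source_address, destination_address, options, padding):
-- 	vers = "{:04b}".format(version)
-- 	ih =  "{:04b}".format(ihl)
-- 	ts =  "{:08b}".format(type_of_service)
-- 	tl = "{:016b}".format(total_length)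
-- 	ide =  "{:016b}".format(identification)
-- 	fl =  "{:03b}".format(flags)
-- 	frag =  "{:013b}".format(fragment_offset)
-- 	time =  "{:08b}".format(time_to_live)
-- 	prot =  "{:08b}".format(protocol)
-- 	source =  "{:032b}".format(source_address)
-- 	dest = "{:032b}".format(destination_address)
-- 	padd =  "{:08b}".format(padding)
--
--
-- 	s = ''
-- 	for c in options:
-- 		s =  s + "{:08b}".format(ord(c))
--
-- 	#calculo de crc para dados a serem enviados
-- 	m =  vers + ih + ts + tl + ide + fl + frag + time + prot + source + dest + s + padd
-- 	check =  crc16(m)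
--
-- 	#pacote final de envio
-- 	pacote = vers + ih + ts + tl + ide + fl + frag + time + prot + check + source + dest + s + padd
-- 	return pacote
-- ===== SOURCE B (Python) =====
-- def criaPacote(version, ihl, type_of_service, total_length, identification, flags, fragment_offset, time_to_live, protocol, header_checksum, source_address, destination_address, options, padding):
--     # header fields before the checksum slot, then the fields after it
--     head = (format(version, '04b') + format(ihl, '04b')
--             + format(type_of_service, '08b') + format(total_length, '016b')
--             + format(identification, '016b') + format(flags, '03b')
--             + format(fragment_offset, '013b') + format(time_to_live, '08b')
--             + format(protocol, '08b'))
--     tail = (format(source_address, '032b') + format(destination_address, '032b')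
--             + ''.join(format(ord(c), '08b') for c in options)
--             + format(padding, '08b'))
--     # CRC16 (poly x^16+x^15+x^2+1) by integer shift register, one pass over the bits
--     r = 0
--     for ch in head + tail:
--         r = 2 * r + int(ch)
--         if r >= 0x10000:
--             r ^= 0x18005
--     return head + format(r, '016b') + tail
-- ===== Notes on version B (the rewrite author's own statement) =====
-- stated objective: faster
-- what changed: A computes the CRC16 by repeatedly slicing, reparsing and reformatting a shrinking bit string (quadratic in the message length); B computes the same remainder with an integer shift register in one pass over the bits and assembles the packet from a head/tail split instead of thirteen named field variables.
import Mathlib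
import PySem

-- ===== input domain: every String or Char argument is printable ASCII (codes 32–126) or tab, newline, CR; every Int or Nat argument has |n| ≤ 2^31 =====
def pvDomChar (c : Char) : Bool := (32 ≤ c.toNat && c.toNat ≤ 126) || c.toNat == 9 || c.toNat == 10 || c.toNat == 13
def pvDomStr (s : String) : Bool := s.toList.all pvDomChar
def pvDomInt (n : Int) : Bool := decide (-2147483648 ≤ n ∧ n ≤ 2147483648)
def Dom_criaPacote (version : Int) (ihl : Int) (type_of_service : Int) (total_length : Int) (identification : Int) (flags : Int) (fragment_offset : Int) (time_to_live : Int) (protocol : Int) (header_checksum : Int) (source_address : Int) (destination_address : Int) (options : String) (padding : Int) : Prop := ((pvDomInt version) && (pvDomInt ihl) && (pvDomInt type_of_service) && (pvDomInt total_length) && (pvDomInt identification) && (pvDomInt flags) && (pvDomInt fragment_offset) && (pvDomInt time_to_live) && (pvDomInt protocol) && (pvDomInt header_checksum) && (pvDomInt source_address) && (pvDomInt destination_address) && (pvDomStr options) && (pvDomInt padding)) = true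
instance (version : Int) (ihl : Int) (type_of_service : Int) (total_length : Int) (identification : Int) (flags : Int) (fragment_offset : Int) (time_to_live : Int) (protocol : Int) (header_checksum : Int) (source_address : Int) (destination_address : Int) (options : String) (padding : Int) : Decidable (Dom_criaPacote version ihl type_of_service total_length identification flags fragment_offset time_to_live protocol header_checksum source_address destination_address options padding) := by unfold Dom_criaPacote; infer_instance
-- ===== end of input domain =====

-- ===== PORT A =====
-- B replaces A's quadratic string-slicing CRC16 long division by a one-pass integer
-- shift register (objective: faster); return values proved equal on Pre_.

-- helper: binary digits of a natural number, most significant first (accumulator form)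
def pvBinAux : Nat → List Char → List Char
  | 0, acc => acc
  | n+1, acc => pvBinAux ((n+1)/2) ((if (n+1) % 2 = 1 then '1' else '0') :: acc)
decreasing_by exact Nat.div_lt_self (Nat.succ_pos n) (by norm_num)

-- Python bin-digit string of a Nat (format(n,'b'))
def pvBin (n : Nat) : List Char := if n = 0 then ['0'] else pvBinAux n []

-- Python "{:0wb}".format(n) for n ≥ 0 (zero pad on the left to width w)
def pvFmt (w n : Nat) : List Char := List.replicate (w - (pvBin n).length) '0' ++ pvBin n

-- Python "{:0wb}".format(n) for Int n: the sign character counts toward the width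
def pvFmtI (w : Nat) (n : Int) : List Char :=
  if n < 0 then '-' :: (List.replicate ((w-1) - (pvBin n.natAbs).length) '0' ++ pvBin n.natAbs)
  else pvFmt w n.toNat

-- int(s, 2): exact for strings of '0'/'1' digits (Python raises ValueError otherwise;
-- such inputs are excluded by Pre_)
def pvVal : List Char → Nat
  | [] => 0
  | c :: cs => (if c = '1' then 1 else 0) * 2 ^ cs.length + pvVal cs

-- A's while-loop; fuel = initial length (the loop drops one char per iteration).
-- On the empty string Python raises IndexError (unreachable inside Pre_).
def pvCrcGo : Nat → List Char → List Char
  | 0, s => s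
  | fuel+1, s =>
    if s.length = 16 then s
    else
      match s with
      | [] => []
      | c :: rest =>
        if c = '1' then
          pvCrcGo fuel (((pvFmt 17 ((pvVal ((c :: rest).take 17)) ^^^ 98309)) ++ (c :: rest).drop 17).drop 1)
        else
          pvCrcGo fuel rest

def crc16 (data : List Char) : List Char := pvCrcGo data.length data

def criaPacote (version : Int) (ihl : Int) (type_of_service : Int) (total_length : Int) (identification : Int) (flags : Int) (fragment_offset : Int) (time_to_live : Int) (protocol : Int) (header_checksum : Int) (source_address : Int) (destination_address : Int) (options : String) (padding : Int) : String :=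
  let vers := pvFmtI 4 version
  let ih := pvFmtI 4 ihl
  let ts := pvFmtI 8 type_of_service
  let tl := pvFmtI 16 total_length
  let ide := pvFmtI 16 identification
  let fl := pvFmtI 3 flags
  let frag := pvFmtI 13 fragment_offset
  let time := pvFmtI 8 time_to_live
  let prot := pvFmtI 8 protocol
  let source := pvFmtI 32 source_address
  let dest := pvFmtI 32 destination_address
  let padd := pvFmtI 8 padding
  let s := options.toList.foldl (fun acc c => acc ++ pvFmtI 8 ((c.toNat : Int))) []
  let m := vers ++ ih ++ ts ++ tl ++ ide ++ fl ++ frag ++ time ++ prot ++ source ++ dest ++ s ++ padd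
  let check := crc16 m
  String.mk (vers ++ ih ++ ts ++ tl ++ ide ++ fl ++ frag ++ time ++ prot ++ check ++ source ++ dest ++ s ++ padd)

-- ===== PORT B =====
-- one step of the CRC16 shift register (Source B's loop body); int(ch) is ported as the
-- bit value of ch — exact on the '0'/'1' strings B's loop runs over (on any other
-- character Python B raises ValueError, and such inputs lie outside Pre_)
def pvStepB (r : Nat) (c : Char) : Nat :=
  let r' := 2 * r + (if c = '1' then 1 else 0)
  if 65536 ≤ r' then r' ^^^ 98309 else r'

def criaPacote_alt (version : Int) (ihl : Int) (type_of_service : Int) (total_length : Int) (identification : Int) (flags : Int) (fragment_offset : Int) (time_to_live : Int) (protocol : Int) (header_checksum : Int) (source_address : Int) (destination_address : Int) (options : String) (padding : Int) : String :=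
  let head := pvFmtI 4 version ++ pvFmtI 4 ihl ++ pvFmtI 8 type_of_service ++ pvFmtI 16 total_length ++ pvFmtI 16 identification ++ pvFmtI 3 flags ++ pvFmtI 13 fragment_offset ++ pvFmtI 8 time_to_live ++ pvFmtI 8 protocol
  let tail := pvFmtI 32 source_address ++ pvFmtI 32 destination_address ++ options.toList.flatMap (fun c => pvFmtI 8 ((c.toNat : Int))) ++ pvFmtI 8 padding
  let r := (head ++ tail).foldl pvStepB 0
  String.mk (head ++ pvFmt 16 r ++ tail)

-- ===== PRECONDITION & SPEC =====
-- Pre_ excludes negative values of the twelve zero-padded bit fields (the unused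
-- header_checksum stays free): there format emits a '-' sign into the message, so A's
-- int(_,2) raises ValueError on almost every such input; on the rare such inputs where
-- A still returns (the sign never lands in a parsed window) its packet is not a
-- bitstring, and B's own bit parse int(ch) raises ValueError on the '-' there.
def Pre_criaPacote (version : Int) (ihl : Int) (type_of_service : Int) (total_length : Int) (identification : Int) (flags : Int) (fragment_offset : Int) (time_to_live : Int) (protocol : Int) (header_checksum : Int) (source_address : Int) (destination_address : Int) (options : String) (padding : Int) : Prop :=
  0 ≤ version ∧ 0 ≤ ihl ∧ 0 ≤ type_of_service ∧ 0 ≤ total_length ∧ 0 ≤ identification ∧ 0 ≤ flags ∧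
  0 ≤ fragment_offset ∧ 0 ≤ time_to_live ∧ 0 ≤ protocol ∧ 0 ≤ source_address ∧
  0 ≤ destination_address ∧ 0 ≤ padding
instance (version : Int) (ihl : Int) (type_of_service : Int) (total_length : Int) (identification : Int) (flags : Int) (fragment_offset : Int) (time_to_live : Int) (protocol : Int) (header_checksum : Int) (source_address : Int) (destination_address : Int) (options : String) (padding : Int) : Decidable (Pre_criaPacote version ihl type_of_service total_length identification flags fragment_offset time_to_live protocol header_checksum source_address destination_address options padding) := by unfold Pre_criaPacote; infer_instance

def pvWitness_criaPacote : Int × Int × Int × Int × Int × Int × Int × Int × Int × Int × Int × Int × String × Int :=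
  (4, 5, 0, 20, 1, 0, 0, 64, 6, 0, 1, 2, "", 0)

def Spec_criaPacote (version : Int) (ihl : Int) (type_of_service : Int) (total_length : Int) (identification : Int) (flags : Int) (fragment_offset : Int) (time_to_live : Int) (protocol : Int) (header_checksum : Int) (source_address : Int) (destination_address : Int) (options : String) (padding : Int) (out : String) : Prop := out = criaPacote_alt version ihl type_of_service total_length identification flags fragment_offset time_to_live protocol header_checksum source_address destination_address options padding
instance (version : Int) (ihl : Int) (type_of_service : Int) (total_length : Int) (identification : Int) (flags : Int) (fragment_offset : Int) (time_to_live : Int) (protocol : Int) (header_checksum : Int) (source_address : Int) (destination_address : Int) (options : String) (padding : Int) (out : String) : Decidable (Spec_criaPacote version ihl type_of_service total_length identification flags fragment_offset time_to_live protocol header_checksum source_address destination_address options padding out) := by unfold Spec_criaPacote; infer_instance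

-- ===== CLAIM (what is proved, stated in full; the proofs are below) =====
def Claim_equal_criaPacote : Prop := ∀ (version : Int) (ihl : Int) (type_of_service : Int) (total_length : Int) (identification : Int) (flags : Int) (fragment_offset : Int) (time_to_live : Int) (protocol : Int) (header_checksum : Int) (source_address : Int) (destination_address : Int) (options : String) (padding : Int), Dom_criaPacote version ihl type_of_service total_length identification flags fragment_offset time_to_live protocol header_checksum source_address destination_address options padding → Pre_criaPacote version ihl type_of_service total_length identification flags fragment_offset time_to_live protocol header_checksum source_address destination_address options padding → Spec_criaPacote version ihl type_of_service total_length identification flags fragment_offset time_to_live protocol header_checksum source_address destination_address options padding (criaPacote version ihl type_of_service total_length identification flags fragment_offset time_to_live protocol header_checksum source_address destination_address options padding)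

-- ===== LEMMAS AND PROOFS =====

-- all characters are binary digits
def pvIsBits (s : List Char) : Prop := ∀ c ∈ s, c = '0' ∨ c = '1'

lemma pvIsBits_append {s t : List Char} (hs : pvIsBits s) (ht : pvIsBits t) : pvIsBits (s ++ t) := by
  intro c hc
  rcases List.mem_append.mp hc with h | h
  · exact hs c h
  · exact ht c h

lemma pvVal_lt (s : List Char) : pvVal s < 2 ^ s.length := by
  induction s with
  | nil => simp [pvVal]
  | cons c cs ih =>
    simp only [pvVal, List.length_cons, pow_succ]
    have hle : (if c = '1' then 1 else 0) * 2 ^ cs.length ≤ 2 ^ cs.length := by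
      split <;> simp
    omega

lemma pvVal_append (s t : List Char) : pvVal (s ++ t) = pvVal s * 2 ^ t.length + pvVal t := by
  induction s with
  | nil => simp [pvVal]
  | cons c cs ih =>
    simp only [List.cons_append, pvVal, List.length_append, List.length_cons, ih, pow_add]
    ring

lemma pvVal_replicate_zero (k : Nat) : pvVal (List.replicate k '0') = 0 := by
  induction k with
  | zero => simp [pvVal]
  | succ n ih => simp [List.replicate_succ, pvVal, ih]

lemma pvVal_inj {s t : List Char} (hs : pvIsBits s) (ht : pvIsBits t)
    (hl : s.length = t.length) (hv : pvVal s = pvVal t) : s = t := by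
  induction s generalizing t with
  | nil =>
    cases t with
    | nil => rfl
    | cons d ds => simp at hl
  | cons c cs ih =>
    cases t with
    | nil => simp at hl
    | cons d ds =>
      simp only [List.length_cons, Nat.add_right_cancel_iff] at hl
      simp only [pvVal, hl] at hv
      have h1 := pvVal_lt cs
      have h2 := pvVal_lt ds
      rw [hl] at h1
      have hcd : c = d ∧ pvVal cs = pvVal ds := by
        rcases hs c (List.mem_cons_self) with hc | hc <;>
        rcases ht d (List.mem_cons_self) with hd | hd <;>
        subst hc <;> subst hd <;> simp_all <;> omega
      rw [hcd.1]
      rw [ih (fun x hx => hs x (List.mem_cons_of_mem _ hx))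
        (fun x hx => ht x (List.mem_cons_of_mem _ hx)) hl hcd.2]

lemma pvBinAux_val (n : Nat) (acc : List Char) :
    pvVal (pvBinAux n acc) = n * 2 ^ acc.length + pvVal acc := by
  induction n, acc using pvBinAux.induct with
  | case1 acc => simp [pvBinAux]
  | case2 n acc ih =>
    simp only [dite_eq_ite] at ih
    rw [pvBinAux, ih]
    have hval : pvVal ((if (n+1) % 2 = 1 then '1' else '0') :: acc) =
        (n+1) % 2 * 2 ^ acc.length + pvVal acc := by
      simp only [pvVal]
      rcases Nat.mod_two_eq_zero_or_one (n+1) with h | h <;> simp [h]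
    rw [hval]
    simp only [List.length_cons, pow_succ, Nat.succ_eq_add_one]
    have hdm := Nat.div_add_mod (n+1) 2
    have hr : (n+1)/2 * (2 ^ acc.length * 2) + ((n+1) % 2 * 2 ^ acc.length + pvVal acc)
        = (2 * ((n+1)/2) + (n+1) % 2) * 2 ^ acc.length + pvVal acc := by ring
    rw [hr, hdm]

lemma pvBinAux_isBits (n : Nat) (acc : List Char) (h : pvIsBits acc) : pvIsBits (pvBinAux n acc) := by
  induction n, acc using pvBinAux.induct with
  | case1 acc => simpa [pvBinAux]
  | case2 n acc ih =>
    simp only [dite_eq_ite] at ih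
    rw [pvBinAux]
    apply ih
    intro c hc
    rcases List.mem_cons.mp hc with h1 | h1
    · subst h1; split <;> simp
    · exact h c h1

lemma pvBinAux_len_le (w : Nat) : ∀ n acc, n < 2 ^ w → (pvBinAux n acc).length ≤ acc.length + w := by
  induction w with
  | zero => intro n acc h; interval_cases n; simp [pvBinAux]
  | succ w ih =>
    intro n acc h
    match n with
    | 0 => simp [pvBinAux]
    | m+1 =>
      rw [pvBinAux]
      have h2 : (m+1)/2 < 2 ^ w := by
        have := pow_succ 2 w
        omega
      have := ih ((m+1)/2) ((if (m+1) % 2 = 1 then '1' else '0') :: acc) h2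
      simp only [List.length_cons] at this
      omega

lemma pvBin_val (n : Nat) : pvVal (pvBin n) = n := by
  unfold pvBin
  split
  · simp [pvVal]; omega
  · rw [pvBinAux_val]; simp [pvVal]

lemma pvBin_isBits (n : Nat) : pvIsBits (pvBin n) := by
  unfold pvBin
  split
  · intro c hc; simp at hc; simp [hc]
  · exact pvBinAux_isBits n [] (by intro c hc; simp at hc)

lemma pvBin_len_le {w n : Nat} (h : n < 2 ^ w) (hw : 1 ≤ w) : (pvBin n).length ≤ w := by
  unfold pvBin
  split
  · simpa
  · have := pvBinAux_len_le w n [] h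
    simpa using this

lemma pvBinAux_len_ge (n : Nat) (acc : List Char) : acc.length ≤ (pvBinAux n acc).length := by
  induction n, acc using pvBinAux.induct with
  | case1 acc => simp [pvBinAux]
  | case2 n acc ih =>
    simp only [dite_eq_ite] at ih
    rw [pvBinAux]
    refine le_trans ?_ ih
    simp

lemma pvBin_len_pos (n : Nat) : 1 ≤ (pvBin n).length := by
  unfold pvBin
  split
  · simp
  · next h =>
    obtain ⟨m, rfl⟩ : ∃ m, n = m + 1 := ⟨n - 1, by omega⟩
    rw [pvBinAux]
    have := pvBinAux_len_ge ((m+1)/2) [(if (m+1) % 2 = 1 then '1' else '0')]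
    simpa using this

lemma pvFmt_val (w n : Nat) : pvVal (pvFmt w n) = n := by
  unfold pvFmt
  rw [pvVal_append, pvVal_replicate_zero, pvBin_val]
  simp

lemma pvFmt_isBits (w n : Nat) : pvIsBits (pvFmt w n) := by
  apply pvIsBits_append _ (pvBin_isBits n)
  intro c hc
  left
  exact List.eq_of_mem_replicate hc

lemma pvFmt_len {w n : Nat} (h : n < 2 ^ w) (hw : 1 ≤ w) : (pvFmt w n).length = w := by
  unfold pvFmt
  have := pvBin_len_le h hw
  simp only [List.length_append, List.length_replicate]
  omega

lemma pvFmt_len_ge (w n : Nat) : w ≤ (pvFmt w n).length := by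
  unfold pvFmt
  simp only [List.length_append, List.length_replicate]
  omega

lemma pvFmt_canon {s : List Char} (hs : pvIsBits s) (h1 : 1 ≤ s.length) :
    pvFmt s.length (pvVal s) = s := by
  apply pvVal_inj (pvFmt_isBits _ _) hs
  · exact pvFmt_len (pvVal_lt s) h1
  · exact pvFmt_val _ _

lemma pvXor_lt {x : Nat} (h1 : 65536 ≤ x) (h2 : x < 131072) : x ^^^ 98309 < 65536 := by
  have h : ∀ i, 16 ≤ i → (x ^^^ 98309).testBit i = false := by
    intro i hi
    rw [Nat.testBit_xor]
    rcases eq_or_lt_of_le hi with h16 | h17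
    · have hd : x >>> 16 = 1 := by rw [Nat.shiftRight_eq_div_pow]; omega
      have hx : x.testBit 16 = true := by simp [Nat.testBit, hd]
      have hp : (98309 : Nat).testBit 16 = true := by decide
      rw [← h16, hx, hp]; rfl
    · have hpow : (2:Nat)^17 ≤ 2 ^ i := Nat.pow_le_pow_right (by norm_num) h17
      have hx : x.testBit i = false := Nat.testBit_eq_false_of_lt (by omega)
      have hp : (98309 : Nat).testBit i = false := Nat.testBit_eq_false_of_lt (by omega)
      rw [hx, hp]; rfl
  refine Nat.lt_of_testBit 16 (h 16 le_rfl) (by decide) (fun j hj => ?_)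
  rw [h j (by omega)]
  have hpow : (2:Nat)^17 ≤ 2 ^ j := Nat.pow_le_pow_right (by norm_num) hj
  exact (Nat.testBit_eq_false_of_lt (by omega)).symm

-- the register value of the shift-register fold, while it stays below 2^16
lemma pvFoldB_small : ∀ (t : List Char) (r : Nat),
    r * 2 ^ t.length + pvVal t < 65536 → t.foldl pvStepB r = r * 2 ^ t.length + pvVal t := by
  intro t
  induction t with
  | nil => intro r h; simp [pvVal]
  | cons c cs ih =>
    intro r h
    set b := (if c = '1' then 1 else 0) with hb
    have hexp : r * 2 ^ (c :: cs).length + pvVal (c :: cs) =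
        (2 * r + b) * 2 ^ cs.length + pvVal cs := by
      simp only [pvVal, List.length_cons, pow_succ, ← hb]
      ring
    rw [hexp] at h
    have hpos : 1 ≤ 2 ^ cs.length := Nat.one_le_two_pow
    have hle : (2 * r + b) ≤ (2 * r + b) * 2 ^ cs.length := Nat.le_mul_of_pos_right _ hpos
    have hstep : pvStepB r c = 2 * r + b := by
      simp only [pvStepB, ← hb]
      rw [if_neg]
      omega
    rw [List.foldl_cons, hstep, ih _ h, hexp]

-- main loop correspondence: A's string division tracks B's shift register
lemma pvCrcGo_eq (fuel : Nat) : ∀ s : List Char, pvIsBits s → 16 ≤ s.length → s.length - 16 ≤ fuel →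
    pvCrcGo fuel s = pvFmt 16 (List.foldl pvStepB (pvVal (s.take 16)) (s.drop 16)) := by
  induction fuel with
  | zero =>
    intro s hb h16 hf
    have hlen : s.length = 16 := by omega
    rw [pvCrcGo]
    rw [List.take_of_length_le (by omega), List.drop_of_length_le (by omega)]
    simp only [List.foldl_nil]
    rw [← hlen, pvFmt_canon hb (by omega)]
  | succ fuel ih =>
    intro s hb h16 hf
    cases s with
    | nil => simp at h16
    | cons c rest =>
      rcases eq_or_lt_of_le h16 with hlen | hlen
      · rw [pvCrcGo, if_pos hlen.symm]
        rw [List.take_of_length_le (by omega), List.drop_of_length_le (by omega)]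
        simp only [List.foldl_nil]
        rw [hlen, pvFmt_canon hb (by simp)]
      · -- (c :: rest).length ≥ 17
        have hrest : 16 ≤ rest.length := by simp at hlen; omega
        have hflen : rest.length - 16 ≤ fuel := by simp at hf; omega
        have h15 : 15 < rest.length := by omega
        have hb_rest : pvIsBits rest := fun x hx => hb x (List.mem_cons_of_mem _ hx)
        have htake16 : (c :: rest).take 16 = c :: rest.take 15 := by rfl
        have hdrop16 : (c :: rest).drop 16 = rest[15] :: rest.drop 16 := by
          show rest.drop 15 = _
          exact List.drop_eq_getElem_cons h15
        have htake15_len : (rest.take 15).length = 15 := by simp; omega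
        have htake16r : rest.take 16 = rest.take 15 ++ [rest[15]] := by
          rw [List.take_succ]
          simp [List.getElem?_eq_getElem h15]
        have hval16r : pvVal (rest.take 16) = 2 * pvVal (rest.take 15) + (if rest[15] = '1' then 1 else 0) := by
          rw [htake16r, pvVal_append]
          simp [pvVal]
          try ring_nf
          try omega
        have hval15_lt : pvVal (rest.take 15) < 2 ^ 15 := by
          have := pvVal_lt (rest.take 15)
          rwa [htake15_len] at this
        have hval16r_lt : pvVal (rest.take 16) < 65536 := by
          have h := pvVal_lt (rest.take 16)
          have hl : (rest.take 16).length = 16 := by simp; omega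
          rw [hl] at h
          omega
        rw [pvCrcGo, if_neg (by simp; omega)]
        by_cases hc : c = '1'
        · rw [if_pos hc]
          -- the xor-and-replace step
          have htake17 : (c :: rest).take 17 = c :: rest.take 16 := by rfl
          have hd17 : pvVal ((c :: rest).take 17) = 65536 + pvVal (rest.take 16) := by
            rw [htake17]
            simp only [pvVal, hc, if_pos]
            have hl : (rest.take 16).length = 16 := by simp; omega
            rw [hl]
            norm_num
          set dx := pvVal ((c :: rest).take 17) ^^^ 98309 with hdx
          have hdx_lt : dx < 65536 := by
            apply pvXor_lt <;> omega
          have hF_len : (pvFmt 17 dx).length = 17 := pvFmt_len (by omega) (by omega)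
          obtain ⟨h0, t, hFt⟩ : ∃ h0 t, pvFmt 17 dx = h0 :: t := by
            cases hF : pvFmt 17 dx with
            | nil => rw [hF] at hF_len; simp at hF_len
            | cons a b => exact ⟨a, b, rfl⟩
          have ht_len : t.length = 16 := by
            rw [hFt] at hF_len; simp at hF_len; omega
          have hF_bits := pvFmt_isBits 17 dx
          have ht_bits : pvIsBits t := by
            intro x hx
            exact hF_bits x (by rw [hFt]; exact List.mem_cons_of_mem _ hx)
          have hF_val : pvVal (pvFmt 17 dx) = dx := pvFmt_val 17 dx
          have ht_val : pvVal t = dx := by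
            rw [hFt] at hF_val
            simp only [pvVal, ht_len] at hF_val
            rcases hF_bits h0 (by rw [hFt]; exact List.mem_cons_self) with h | h
            · rw [h] at hF_val; simpa using hF_val
            · rw [h] at hF_val; simp at hF_val; omega
          have hdrop17 : (c :: rest).drop 17 = rest.drop 16 := by rfl
          have hs' : ((pvFmt 17 dx) ++ (c :: rest).drop 17).drop 1 = t ++ rest.drop 16 := by
            rw [hFt, hdrop17]
            rfl
          rw [hs']
          have hlen' : (t ++ rest.drop 16).length = rest.length := by
            simp [ht_len]; omega
          rw [ih (t ++ rest.drop 16)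
            (pvIsBits_append ht_bits (fun x hx => hb_rest x (List.mem_of_mem_drop hx)))
            (by rw [hlen']; exact hrest) (by rw [hlen']; exact hflen)]
          congr 1
          rw [List.take_append_of_le_length (by omega), List.take_of_length_le (by omega),
            List.drop_append_of_le_length (by omega), List.drop_of_length_le (by omega)]
          simp only [List.nil_append, hdrop16]
          rw [List.foldl_cons]
          congr 1
          -- pvStepB (pvVal (take 16)) rest[15] = pvVal t = dx
          rw [ht_val, htake16]
          unfold pvStepB
          have hvc : pvVal (c :: rest.take 15) = 32768 + pvVal (rest.take 15) := by
            simp only [pvVal, hc, if_pos, htake15_len]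
            norm_num
          rw [hvc]
          rw [if_pos (by omega)]
          rw [hdx, hd17, hval16r]
          congr 1
          omega
        · rw [if_neg hc]
          rw [ih rest hb_rest hrest hflen]
          congr 1
          rw [hdrop16, List.foldl_cons]
          congr 1
          -- pvStepB (pvVal (take 16)) rest[15] = pvVal (rest.take 16)
          rw [htake16]
          unfold pvStepB
          have hvc : pvVal (c :: rest.take 15) = pvVal (rest.take 15) := by
            rcases hb c List.mem_cons_self with h | h
            · simp [pvVal, h, htake15_len]
            · exact absurd h hc
          rw [hvc, if_neg (by omega), hval16r]

-- full correspondence for a message whose first character may be '-' (negative version):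
-- both programs treat a leading non-'1' character as a 0 bit
lemma pvCrc16_full (c : Char) (w : List Char) (hw : pvIsBits w)
    (hc : c = '-' ∨ c = '0' ∨ c = '1') (hlen : 16 ≤ w.length) :
    crc16 (c :: w) = pvFmt 16 ((c :: w).foldl pvStepB 0) := by
  have hfold : ∀ (u : List Char), pvIsBits u → 16 ≤ u.length →
      List.foldl pvStepB (pvVal (u.take 16)) (u.drop 16) = u.foldl pvStepB 0 := by
    intro u hu h16
    conv_rhs => rw [← List.take_append_drop 16 u, List.foldl_append]
    congr 1
    have hlt : pvVal (u.take 16) < 65536 := by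
      have h := pvVal_lt (u.take 16)
      have : (u.take 16).length ≤ 16 := by simp
      have : (2:Nat) ^ (u.take 16).length ≤ 2 ^ 16 := Nat.pow_le_pow_right (by norm_num) this
      omega
    rw [pvFoldB_small (u.take 16) 0 (by simpa using hlt)]
    simp
  rcases hc with hc | hc
  · -- leading '-': one peeled iteration of A's loop, one absorbed step of B's fold
    subst hc
    show pvCrcGo (w.length + 1) ('-' :: w) = _
    simp only [pvCrcGo]
    rw [if_neg (by simp; omega), if_neg (by decide)]
    rw [pvCrcGo_eq w.length w hw hlen (by omega), hfold w hw hlen]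
    have hstep : pvStepB 0 '-' = 0 := by decide
    rw [List.foldl_cons, hstep]
  · -- leading bit: the whole string is binary
    have hb : pvIsBits ('1' :: w) → True := fun _ => trivial
    have hbits : pvIsBits (c :: w) := by
      intro x hx
      rcases List.mem_cons.mp hx with h | h
      · subst h; exact hc
      · exact hw x h
    show pvCrcGo (c :: w).length (c :: w) = _
    rw [pvCrcGo_eq _ (c :: w) hbits (by simp; omega) (by omega),
      hfold (c :: w) hbits (by simp; omega)]

lemma pvFmtI_nonneg {n : Int} (h : 0 ≤ n) (w : Nat) : pvFmtI w n = pvFmt w n.toNat := by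
  unfold pvFmtI
  rw [if_neg (by omega)]

lemma pvFmtI_shape (w : Nat) (n : Int) :
    ∃ c t, pvFmtI w n = c :: t ∧ (c = '-' ∨ c = '0' ∨ c = '1') ∧ pvIsBits t := by
  unfold pvFmtI
  split
  · exact ⟨'-', _, rfl, Or.inl rfl,
      pvIsBits_append (fun x hx => Or.inl (List.eq_of_mem_replicate hx)) (pvBin_isBits _)⟩
  · have hb := pvFmt_isBits w (Int.toNat n)
    have hlen : 1 ≤ (pvFmt w (Int.toNat n)).length := by
      unfold pvFmt
      simp only [List.length_append, List.length_replicate]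
      have := pvBin_len_pos (Int.toNat n)
      omega
    cases hF : pvFmt w (Int.toNat n) with
    | nil => rw [hF] at hlen; simp at hlen
    | cons a b =>
      rw [hF] at hb
      exact ⟨a, b, rfl, Or.inr (hb a List.mem_cons_self),
        fun x hx => hb x (List.mem_cons_of_mem _ hx)⟩

-- ===== VERDICT (by name: the statement is the Claim_ definition above) =====
set_option maxHeartbeats 2000000 in
theorem criaPacote_spec : Claim_equal_criaPacote := by
  intro version ihl type_of_service total_length identification flags fragment_offset
    time_to_live protocol header_checksum source_address destination_address options padding
    _hdom hpre
  obtain ⟨h0, h1, h2, h3, h4, h5, h6, h7, h8, h9, h10, h11⟩ := hpre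
  unfold Spec_criaPacote criaPacote criaPacote_alt
  have hs : options.toList.foldl (fun acc c => acc ++ pvFmtI 8 ((c.toNat : Int))) [] =
      options.toList.flatMap (fun c => pvFmtI 8 ((c.toNat : Int))) := by
    rw [PySem.List.foldl_append_eq_flatMap]
    simp
  -- all fields except version are plain bit strings under Pre_
  have hOptBits : pvIsBits (options.toList.flatMap (fun c => pvFmtI 8 ((c.toNat : Int)))) := by
    intro x hx
    rw [List.mem_flatMap] at hx
    obtain ⟨c, _, hmem⟩ := hx
    rw [pvFmtI_nonneg (Int.natCast_nonneg _) 8] at hmem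
    exact pvFmt_isBits 8 _ x hmem
  obtain ⟨c0, t0, hV, hc0, ht0⟩ := pvFmtI_shape 4 version
  -- the shared message body after the first character
  have hRbits : pvIsBits (t0 ++ (pvFmtI 4 ihl ++ pvFmtI 8 type_of_service ++ pvFmtI 16 total_length ++
      pvFmtI 16 identification ++ pvFmtI 3 flags ++ pvFmtI 13 fragment_offset ++
      pvFmtI 8 time_to_live ++ pvFmtI 8 protocol ++ pvFmtI 32 source_address ++
      pvFmtI 32 destination_address ++
      options.toList.flatMap (fun c => pvFmtI 8 ((c.toNat : Int))) ++ pvFmtI 8 padding)) := by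
    refine pvIsBits_append ht0 ?_
    rw [pvFmtI_nonneg h1, pvFmtI_nonneg h2, pvFmtI_nonneg h3, pvFmtI_nonneg h4,
      pvFmtI_nonneg h5, pvFmtI_nonneg h6, pvFmtI_nonneg h7, pvFmtI_nonneg h8,
      pvFmtI_nonneg h9, pvFmtI_nonneg h10, pvFmtI_nonneg h11]
    exact pvIsBits_append (pvIsBits_append (pvIsBits_append (pvIsBits_append (pvIsBits_append (pvIsBits_append (pvIsBits_append (pvIsBits_append (pvIsBits_append (pvIsBits_append (pvIsBits_append (pvFmt_isBits _ _) (pvFmt_isBits _ _)) (pvFmt_isBits _ _)) (pvFmt_isBits _ _)) (pvFmt_isBits _ _)) (pvFmt_isBits _ _)) (pvFmt_isBits _ _)) (pvFmt_isBits _ _)) (pvFmt_isBits _ _)) (pvFmt_isBits _ _)) hOptBits) (pvFmt_isBits _ _)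
  rw [hs]
  rw [hV]
  have hcrc := pvCrc16_full c0
    (t0 ++ (pvFmtI 4 ihl ++ pvFmtI 8 type_of_service ++ pvFmtI 16 total_length ++
      pvFmtI 16 identification ++ pvFmtI 3 flags ++ pvFmtI 13 fragment_offset ++
      pvFmtI 8 time_to_live ++ pvFmtI 8 protocol ++ pvFmtI 32 source_address ++
      pvFmtI 32 destination_address ++
      options.toList.flatMap (fun c => pvFmtI 8 ((c.toNat : Int))) ++ pvFmtI 8 padding))
    hRbits hc0
    (by
      simp only [List.length_append]
      have := pvFmt_len_ge 32 source_address.toNat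
      rw [pvFmtI_nonneg h9]
      omega)
  simp only [List.cons_append, List.append_assoc] at hcrc ⊢
  rw [hcrc]
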